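-- pv_equiv track=rewrite | github.com/keunseop/divided-dashboard | core/kis/domestic_quotes.py | _extract_name_ko
-- ===== SOURCE A (Python) =====
-- def _extract_name_ko(output: dict) -> str | None:
--     candidates = [
--         "hts_kor_isnm",
--         "kor_isnm",
--         "stck_name",
--         "itms_nm",
--         "prdt_name",
--         "prdt_abrv_name",
--         "name",
--         "stock_name",
--         "itm_name",
--     ]
--     for key in candidates:
--         value = output.get(key)
--         if value:
--             text = str(value).strip()
--             if text:
--                 return text
--     for key, value in output.items():
--         if not isinstance(value, str):
--             continue
--         text = value.strip()
--         if not text: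
--             continue
--         lower = key.lower()
--         if "name" in lower or "isnm" in lower:
--             if any(bad in lower for bad in ("bstp", "inds", "sector", "market")):
--                 continue
--             return text
--     for key, value in output.items():
--         if not isinstance(value, str):
--             continue
--         text = value.strip()
--         if not text:
--             continue
--         lower = key.lower()
--         if "name" in lower or "isnm" in lower:
--             return text
--     return None
-- ===== SOURCE B (Python) =====
-- _CANDIDATES = (
--     "hts_kor_isnm",
--     "kor_isnm",
--     "stck_name",
--     "itms_nm",
--     "prdt_name",
--     "prdt_abrv_name",
--     "name",
--     "stock_name",
--     "itm_name",
-- )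
--
-- _BAD = ("bstp", "inds", "sector", "market")
--
--
-- def _extract_name_ko(output: dict) -> str | None:
--     for key in _CANDIDATES:
--         text = str(output.get(key) or "").strip()
--         if text:
--             return text
--     # single pass instead of A's two scans: return the first non-bad
--     # name-like value at once, remember the first name-like value as fallback
--     first_any = None
--     for key, value in output.items():
--         if not isinstance(value, str):
--             continue
--         text = value.strip()
--         if not text:
--             continue
--         lower = key.lower()
--         if "name" in lower or "isnm" in lower:
--             if not any(bad in lower for bad in _BAD):
--                 return text
--             if first_any is None:
--                 first_any = text
--     return first_any
-- ===== Notes on version B (the rewrite author's own statement) =====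
-- stated objective: simpler
-- what changed: A's two separate items() scans (non-bad name-like first, then any name-like) are fused into one pass that returns a non-bad match immediately and keeps the first name-like text in a fallback variable.
import Mathlib
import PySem

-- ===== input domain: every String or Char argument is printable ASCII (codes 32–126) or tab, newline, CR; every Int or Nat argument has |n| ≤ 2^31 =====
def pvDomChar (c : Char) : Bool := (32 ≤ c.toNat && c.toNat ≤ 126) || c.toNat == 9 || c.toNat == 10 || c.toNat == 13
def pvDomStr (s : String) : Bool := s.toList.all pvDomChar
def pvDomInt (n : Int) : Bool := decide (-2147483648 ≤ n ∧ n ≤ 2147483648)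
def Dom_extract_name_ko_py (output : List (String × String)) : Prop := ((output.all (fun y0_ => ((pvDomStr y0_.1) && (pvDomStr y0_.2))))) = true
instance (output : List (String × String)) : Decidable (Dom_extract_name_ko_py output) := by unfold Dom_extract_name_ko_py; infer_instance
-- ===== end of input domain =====

-- B replaces A's two items() scans by one pass with a first-match fallback accumulator (objective: simpler).

-- ===== PORT A =====
def pvCandidates : List String :=
  ["hts_kor_isnm", "kor_isnm", "stck_name", "itms_nm", "prdt_name",
   "prdt_abrv_name", "name", "stock_name", "itm_name"]

def pvNameLike (l : String) : Bool := PySem.Str.isIn "name" l || PySem.Str.isIn "isnm" l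

def pvBad (l : String) : Bool :=
  PySem.Str.isIn "bstp" l || PySem.Str.isIn "inds" l || PySem.Str.isIn "sector" l || PySem.Str.isIn "market" l

-- first for-loop of A: try the fixed candidate keys in order
def pvCandLoopA (output : List (String × String)) : List String → Option String
  | [] => none
  | k :: ks =>
    match (PySem.Dict.mk output).get? k with
    | some v =>
      if v ≠ "" then
        let t := PySem.Str.strip v
        if t ≠ "" then some t else pvCandLoopA output ks
      else pvCandLoopA output ks
    | none => pvCandLoopA output ks

-- second for-loop of A: first non-"bad" name-like value
def pvLoop2A : List (String × String) → Option String
  | [] => none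
  | (k, v) :: rest =>
    let t := PySem.Str.strip v
    if t = "" then pvLoop2A rest
    else
      let l := PySem.Str.lower k
      if pvNameLike l then
        if pvBad l then pvLoop2A rest else some t
      else pvLoop2A rest

-- third for-loop of A: first name-like value, bad or not
def pvLoop3A : List (String × String) → Option String
  | [] => none
  | (k, v) :: rest =>
    let t := PySem.Str.strip v
    if t = "" then pvLoop3A rest
    else
      let l := PySem.Str.lower k
      if pvNameLike l then some t else pvLoop3A rest

def extract_name_ko_py (output : List (String × String)) : Option String :=
  match pvCandLoopA output pvCandidates with
  | some t => some t
  | none =>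
    match pvLoop2A output with
    | some t => some t
    | none => pvLoop3A output

-- ===== PORT B =====
-- candidate loop of B: text = str(output.get(key) or "").strip()
def pvCandLoopB (output : List (String × String)) : List String → Option String
  | [] => none
  | k :: ks =>
    let t := PySem.Str.strip (((PySem.Dict.mk output).get? k).getD "")
    if t ≠ "" then some t else pvCandLoopB output ks

-- single pass of B: acc is the 'first_any' fallback variable
def pvScanB : List (String × String) → Option String → Option String
  | [], acc => acc
  | (k, v) :: rest, acc =>
    let t := PySem.Str.strip v
    if t = "" then pvScanB rest acc
    else
      let l := PySem.Str.lower k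
      if pvNameLike l then
        if !pvBad l then some t
        else pvScanB rest (if acc = none then some t else acc)
      else pvScanB rest acc

def extract_name_ko_py_alt (output : List (String × String)) : Option String :=
  match pvCandLoopB output pvCandidates with
  | some t => some t
  | none => pvScanB output none

-- ===== PRECONDITION & SPEC =====
def Spec_extract_name_ko_py (output : List (String × String)) (out : Option String) : Prop := out = extract_name_ko_py_alt output
instance (output : List (String × String)) (out : Option String) : Decidable (Spec_extract_name_ko_py output out) := by unfold Spec_extract_name_ko_py; infer_instance

-- ===== CLAIM (what is proved, stated in full; the proofs are below) =====
def Claim_equal_extract_name_ko_py : Prop := ∀ (output : List (String × String)), Dom_extract_name_ko_py output → Spec_extract_name_ko_py output (extract_name_ko_py output)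

-- ===== LEMMAS AND PROOFS =====
def pvOr (a b : Option String) : Option String :=
  match a with
  | some x => some x
  | none => b

theorem pvCandLoop_eq (output : List (String × String)) (ks : List String) :
    pvCandLoopA output ks = pvCandLoopB output ks := by
  induction ks with
  | nil => rfl
  | cons k ks ih =>
    simp only [pvCandLoopA, pvCandLoopB]
    cases h : (PySem.Dict.mk output).get? k with
    | none => simpa [h] using ih
    | some v =>
      by_cases hv : v = ""
      · subst hv; simpa [h] using ih
      · simp only [h, Option.getD_some, if_pos hv, ite_not]
        by_cases ht : PySem.Str.strip v = "" <;> simp [ht, ih]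

theorem pvScan_eq (rest : List (String × String)) (acc : Option String) :
    pvScanB rest acc = pvOr (pvLoop2A rest) (pvOr acc (pvLoop3A rest)) := by
  induction rest generalizing acc with
  | nil => cases acc <;> rfl
  | cons p rest ih =>
    obtain ⟨k, v⟩ := p
    simp only [pvScanB, pvLoop2A, pvLoop3A]
    by_cases ht : PySem.Str.strip v = ""
    · simp [ht, ih]
    · by_cases hn : pvNameLike (PySem.Str.lower k)
      · by_cases hb : pvBad (PySem.Str.lower k)
        · simp only [if_neg ht, hn, if_true, hb, Bool.not_true, Bool.false_eq_true, if_false, ih]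
          cases acc <;> simp [pvOr]
        · simp [ht, hn, hb, pvOr]
      · simp [ht, hn, ih]

-- ===== VERDICT (by name: the statement is the Claim_ definition above) =====
theorem extract_name_ko_py_spec : Claim_equal_extract_name_ko_py := by
  intro output _
  unfold Spec_extract_name_ko_py extract_name_ko_py extract_name_ko_py_alt
  rw [pvCandLoop_eq, pvScan_eq]
  cases pvCandLoopB output pvCandidates with
  | some t => rfl
  | none =>
    cases pvLoop2A output <;> cases pvLoop3A output <;> rfl
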